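-- pv_equiv track=rewrite | github.com/Rafael-R/ist-projects | Foundations of Programming/1718/2.py | conjunto_palavras_para_cadeia
-- ===== SOURCE A (Python) =====
-- def palavra_tamanho(palavra_potencial):
--     """
--     palavra_tamanho: palavra_potencial -> inteiro
--     Este selector recebe como argumento um elemento do tipo palavra_potencial e
--     devolve o numero de letras da palavra.
--     """
--     return len(palavra_potencial)
--
-- def palavra_potencial_para_cadeia(palavra_potencial):
--     """
--     palavra_potencial_para_cadeia: palavra_potencial -> cad. caracteres
--     Esta funcao recebe como argumento um elemento do tipo palavra_potencial e devolve
--     uma cadeia de caracteres que a represente.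
--     """
--     return str(palavra_potencial)
--
-- def numero_palavras(conjunto_palavras):
--     """
--     numero_palavras: conjunto_palavras -> inteiro
--     Este seletor recebe como argumento um elemento do tipo conjunto_palavras e
--     devolve um inteiro correspondente ao numero de palavras guardadas.
--     """
--     return len(conjunto_palavras)
--
-- def subconjunto_por_tamanho(conjunto_palavras, inteiro):
--     """
--     subconjunto_por_tamanho: conjunto_palavras x inteiro -> lista
--     Este seletor recebe como argumentos um elemento do tipo conjunto_palavras e um
--     inteiro n, e devolve uma lista com as palavras_potenciais de tamanho n contidas
--     no conjunto de palavras.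
--     """
--     subconjunto = []
--     for i in range(numero_palavras(conjunto_palavras)):
--         if palavra_tamanho(conjunto_palavras[i]) == inteiro:
--             subconjunto += [conjunto_palavras[i]]
--     return subconjunto
--
-- def conjunto_palavras_para_cadeia(conjunto_palavras):
--     """
--     conjunto_palavras_para_cadeia: conjunto_palavras -> cad. caracteres
--     Esta funcao recebe como argumento um elemento do tipo conjunto_palavras e devolve
--     uma cadeia de caracteres que o represente. As palavras sao enumeradas por ordem
--     crescente do seu tamanho, e para cada tamanho sao ordenadas alfabeticamente,
--     """
--     conjunto = sorted(conjunto_palavras, key=len)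
--     res = {}
--     cadeia = ''
--     if conjunto != []:
--         for i in range(palavra_tamanho(conjunto[-1]) + 1):                          # i varia de 0 ao tamanho da maior
--             lista = sorted(subconjunto_por_tamanho(conjunto_palavras, i))           # palavra do conjunto, gerando assim
--             lista_str = ''                                                          # um subconjunto para todos os
--             if lista != [] and numero_palavras(lista) == 1:                         # tamanhos possiveis, que sao depois
--                 res[i] = '[' + lista[0] + ']'                                       # adicionados a um dicionario.
--             elif lista != [] and numero_palavras(lista) > 1:
--                 for j in range(numero_palavras(lista) - 1):
--                     lista_str += palavra_potencial_para_cadeia(lista[j]) + ', '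
--                 res[i] = '[' + lista_str + lista[-1] + ']'
--             else:
--                 res[i] = ''
--         j = 0
--         while j < palavra_tamanho(conjunto[-1]):                                    # O dicionario e depois transformado
--             if res[j] == '':                                                        # numa string.
--                 j += 1
--             else:
--                 cadeia += str(j) + '->' + str(res[j]) + ';'
--                 j += 1
--         final = palavra_tamanho(conjunto[-1])
--         cadeia_final = '[' + cadeia + str(final) + '->' + str(res[final]) + ']'
--         return cadeia_final
--     elif conjunto == []:                                                              # Se o conjunto inicial for vazio,
--         cadeia_final = '[]'                                                           # e devolvida uma string com uma
--     return cadeia_final                                                               # lista vazia.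
-- ===== SOURCE B (Python) =====
-- def conjunto_palavras_para_cadeia(conjunto_palavras):
--     if not conjunto_palavras:
--         return '[]'
--     buckets = {}
--     for w in conjunto_palavras:
--         buckets.setdefault(len(w), []).append(w)
--     parts = []
--     for n in sorted(buckets):
--         parts.append(str(n) + '->[' + ', '.join(sorted(buckets[n])) + ']')
--     return '[' + ';'.join(parts) + ']'
-- ===== Notes on version B (the rewrite author's own statement) =====
-- stated objective: faster
-- what changed: B buckets the words by length into a dict in a single pass and joins the sorted buckets directly, instead of A's re-scan of the whole list for every length from 0 up to the maximum plus a dict-then-while rebuild.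
import Mathlib
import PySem

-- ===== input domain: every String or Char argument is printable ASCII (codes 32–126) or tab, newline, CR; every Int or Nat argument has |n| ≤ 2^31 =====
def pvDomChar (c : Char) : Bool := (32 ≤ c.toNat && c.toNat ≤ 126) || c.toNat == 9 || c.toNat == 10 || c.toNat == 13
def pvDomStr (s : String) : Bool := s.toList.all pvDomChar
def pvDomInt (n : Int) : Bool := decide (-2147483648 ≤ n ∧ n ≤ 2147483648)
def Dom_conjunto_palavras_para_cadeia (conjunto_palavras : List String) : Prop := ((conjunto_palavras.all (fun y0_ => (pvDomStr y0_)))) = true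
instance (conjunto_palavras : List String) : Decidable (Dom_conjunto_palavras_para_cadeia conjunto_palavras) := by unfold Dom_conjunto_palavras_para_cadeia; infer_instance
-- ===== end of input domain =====

-- B buckets the words by length in one pass over the list and joins the sorted buckets directly,
-- instead of A's scan of the whole list for every length from 0 to the maximum (objective: faster).


-- ===== PORT A =====
def palavra_tamanho (palavra_potencial : String) : Int := PySem.Str.len palavra_potencial

def palavra_potencial_para_cadeia (palavra_potencial : String) : String := palavra_potencial

def numero_palavras (conjunto_palavras : List String) : Int := PySem.List.len conjunto_palavras

-- indices drawn from range(len(..)) are always in range, so pyGetD's default is never used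
def subconjunto_por_tamanho (conjunto_palavras : List String) (inteiro : Int) : List String :=
  (PySem.List.pyRange 0 (numero_palavras conjunto_palavras)).foldl
    (fun subconjunto i =>
      if palavra_tamanho (PySem.List.pyGetD conjunto_palavras i "") == inteiro then
        subconjunto ++ [PySem.List.pyGetD conjunto_palavras i ""]
      else subconjunto) []

-- the 'for i in range(...): res[i] = …' loop of A
def pvResLoop (conjunto_palavras : List String) (m : Int) : PySem.Dict Int String :=
  (PySem.List.pyRange 0 (m + 1)).foldl
    (fun res i =>
      let lista := PySem.List.sorted (subconjunto_por_tamanho conjunto_palavras i) (fun w => w)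
      if lista ≠ [] ∧ numero_palavras lista = 1 then
        res.insert i ("[" ++ PySem.List.pyGetD lista 0 "" ++ "]")
      else if lista ≠ [] ∧ numero_palavras lista > 1 then
        let lista_str := (PySem.List.pyRange 0 (numero_palavras lista - 1)).foldl
          (fun lista_str j =>
            lista_str ++ palavra_potencial_para_cadeia (PySem.List.pyGetD lista j "") ++ ", ") ""
        res.insert i ("[" ++ lista_str ++ PySem.List.pyGetD lista (-1) "" ++ "]")
      else res.insert i "")
    PySem.Dict.empty

-- the 'while j < …' loop of A; j goes 0,1,…, so the loop runs exactly m.toNat times (fuel)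
def pvCadeiaLoop (res : PySem.Dict Int String) : Nat → Int → String → String
  | 0, _, cadeia => cadeia
  | fuel + 1, j, cadeia =>
    if res.getD j "" == "" then pvCadeiaLoop res fuel (j + 1) cadeia
    else pvCadeiaLoop res fuel (j + 1)
      (cadeia ++ PySem.Int.toStr j ++ "->" ++ res.getD j "" ++ ";")

def conjunto_palavras_para_cadeia (conjunto_palavras : List String) : String :=
  let conjunto := PySem.List.sorted conjunto_palavras (fun w => palavra_tamanho w)
  if conjunto ≠ [] then
    let final := palavra_tamanho (PySem.List.pyGetD conjunto (-1) "")
    let res := pvResLoop conjunto_palavras final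
    let cadeia := pvCadeiaLoop res final.toNat 0 ""
    "[" ++ cadeia ++ PySem.Int.toStr final ++ "->" ++ res.getD final "" ++ "]"
  else "[]"

-- ===== PORT B =====
-- buckets.setdefault(len(w), []).append(w) = modify at key len(w), default [], appending w
def conjunto_palavras_para_cadeia_alt (conjunto_palavras : List String) : String :=
  if conjunto_palavras = [] then "[]"
  else
    let buckets := conjunto_palavras.foldl
      (fun (b : PySem.Dict Int (List String)) w =>
        b.modify (PySem.Str.len w) [] (fun l => l ++ [w]))
      PySem.Dict.empty
    let parts := (PySem.List.sorted buckets.keys (fun n => n)).foldl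
      (fun parts n =>
        parts ++ [PySem.Int.toStr n ++ "->[" ++
          PySem.Str.join ", " (PySem.List.sorted (buckets.getD n []) (fun w => w)) ++ "]"]) []
    "[" ++ PySem.Str.join ";" parts ++ "]"

-- ===== PRECONDITION & SPEC =====
def Spec_conjunto_palavras_para_cadeia (conjunto_palavras : List String) (out : String) : Prop := out = conjunto_palavras_para_cadeia_alt conjunto_palavras
instance (conjunto_palavras : List String) (out : String) : Decidable (Spec_conjunto_palavras_para_cadeia conjunto_palavras out) := by unfold Spec_conjunto_palavras_para_cadeia; infer_instance

-- ===== CLAIM (what is proved, stated in full; the proofs are below) =====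
def Claim_equal_conjunto_palavras_para_cadeia : Prop := ∀ (conjunto_palavras : List String), Dom_conjunto_palavras_para_cadeia conjunto_palavras → Spec_conjunto_palavras_para_cadeia conjunto_palavras (conjunto_palavras_para_cadeia conjunto_palavras)

-- ===== LEMMAS AND PROOFS =====

-- the words of cp of length n, in order (shared vocabulary of both proofs)
def pvBucket (cp : List String) (n : Int) : List String :=
  cp.filter (fun w => PySem.Str.len w == n)

-- the dict value A stores for length i (and "" for an absent length)
def pvEntry (cp : List String) (i : Int) : String :=
  if pvBucket cp i = [] then ""
  else "[" ++ PySem.Str.join ", " (PySem.List.sorted (pvBucket cp i) (fun w => w)) ++ "]"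

-- the rendered group for length n, as a list of chars
def pvPartC (cp : List String) (n : Int) : List Char :=
  (PySem.Int.toStr n).toList ++ "->[".toList ++
    (PySem.Str.join ", " (PySem.List.sorted (pvBucket cp n) (fun w => w))).toList ++ "]".toList

lemma subconjunto_eq_bucket (cp : List String) (n : Int) :
    subconjunto_por_tamanho cp n = pvBucket cp n := by
  unfold subconjunto_por_tamanho numero_palavras
  have h := PySem.List.foldl_pyRange_pyGetD cp ""
    (fun acc w => if palavra_tamanho w == n then acc ++ [w] else acc) [] (a := 0) le_rfl
  simp only [Int.toNat_zero, List.drop_zero] at h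
  rw [h]
  have h2 := PySem.List.foldl_append_if (fun w => palavra_tamanho w == n) (fun w => w) cp []
  simp only [List.nil_append] at h2
  rw [h2, List.map_id']
  rfl

lemma pyGetD_neg_one {α : Type} (l : List α) (d : α) (h : l ≠ []) :
    PySem.List.pyGetD l (-1) d = l.getLast h := by
  have hl : 0 < l.length := List.length_pos_of_ne_nil h
  simp only [PySem.List.pyGetD, PySem.List.pyGet?, PySem.List.pyIdx?]
  have h1 : ¬ ((0:Int) ≤ -1) := by omega
  have h2 : -(l.length : Int) ≤ -1 := by omega
  simp only [h1, if_false, h2, if_pos]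
  have h3 : (-(-1 : Int)).toNat = 1 := rfl
  rw [h3, List.getLast_eq_getElem]
  simp [List.getElem?_eq_getElem (show l.length - 1 < l.length by omega)]

-- '[' ++ sep-joined chars: intercalate over a snoc
lemma pv_intercalate_snoc (sep p : List Char) (ps : List (List Char)) :
    sep.intercalate (ps ++ [p]) = (ps.map (fun x => x ++ sep)).flatten ++ p := by
  induction ps with
  | nil => simp [List.intercalate]
  | cons x xs ih =>
    cases xs with
    | nil => simp [List.intercalate, List.intersperse]
    | cons y ys =>
      have hcc : ∀ (z : List Char) (zs : List (List Char)),
          sep.intercalate (x :: z :: zs) = x ++ sep ++ sep.intercalate (z :: zs) := by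
        intro z zs
        simp [List.intercalate, List.intersperse, List.append_assoc]
      rw [List.cons_append] at ih
      rw [List.cons_append, List.cons_append, hcc, ih]
      simp [List.append_assoc]

lemma pv_foldl_append_toList (xs : List String) (a : String) (sep : String) :
    (xs.foldl (fun s w => s ++ w ++ sep) a).toList
    = a.toList ++ (xs.map (fun w => w.toList ++ sep.toList)).flatten := by
  induction xs generalizing a with
  | nil => simp
  | cons x xs ih => simp [ih, String.toList_append]

-- A's inner ', '-loop plus the last element is exactly the ', '-join
lemma loop_join (l : List String) (hl : l ≠ []) :
    ((PySem.List.pyRange 0 (PySem.List.len l - 1)).foldl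
      (fun s j => s ++ PySem.List.pyGetD l j "" ++ ", ") "") ++ PySem.List.pyGetD l (-1) ""
    = PySem.Str.join ", " l := by
  have hl0 : 0 < l.length := List.length_pos_of_ne_nil hl
  have hlen : PySem.List.len l - 1 = PySem.List.len l.dropLast := by
    simp [PySem.List.len, List.length_dropLast]; omega
  rw [hlen]
  rw [PySem.List.foldl_congr_mem _ _
    (fun s j => s ++ PySem.List.pyGetD l.dropLast j "" ++ ", ") _
    (by
      intro acc j hj
      show acc ++ PySem.List.pyGetD l j "" ++ ", "
        = acc ++ PySem.List.pyGetD l.dropLast j "" ++ ", "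
      rw [PySem.List.mem_pyRange_one] at hj
      have hj2 : j < (l.dropLast.length : Int) := by
        simp only [PySem.List.len] at hj; exact_mod_cast hj.2
      have hj3 : j < (l.length : Int) := by
        simp only [List.length_dropLast] at hj2; omega
      rw [PySem.List.pyGetD_eq_getElem l "" hj.1 hj3,
          PySem.List.pyGetD_eq_getElem l.dropLast "" hj.1 hj2,
          List.getElem_dropLast])]
  have h := PySem.List.foldl_pyRange_pyGetD l.dropLast ""
    (fun s w => s ++ w ++ ", ") "" (a := 0) le_rfl
  simp only [Int.toNat_zero, List.drop_zero] at h
  rw [h, pyGetD_neg_one l "" hl]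
  rw [← String.toList_inj]
  rw [String.toList_append, pv_foldl_append_toList, PySem.Str.toList_join]
  have hdecomp : l.map String.toList
      = l.dropLast.map String.toList ++ [(l.getLast hl).toList] := by
    conv_lhs => rw [← List.dropLast_append_getLast hl]
    simp
  rw [hdecomp]
  simp only [PySem.Chars.join]
  rw [pv_intercalate_snoc]
  simp [List.map_map, Function.comp_def]

lemma getD_foldl_insert_fn (g : Int → String) (ks : List Int) (d : PySem.Dict Int String) (k : Int) :
    (ks.foldl (fun d i => d.insert i (g i)) d).getD k ""
    = if k ∈ ks then g k else d.getD k "" := by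
  induction ks generalizing d with
  | nil => simp
  | cons i ks ih =>
    simp only [List.foldl_cons, ih, List.mem_cons]
    by_cases hks : k ∈ ks
    · simp [hks]
    · rw [if_neg hks, PySem.Dict.getD_insert]
      by_cases hk : k = i <;> simp [hk, hks]

-- the value stored in each res[i] equals pvEntry
lemma pvResLoop_body_val (cp : List String) (i : Int) :
    (let lista := PySem.List.sorted (subconjunto_por_tamanho cp i) (fun w => w)
     if lista ≠ [] ∧ numero_palavras lista = 1 then
       "[" ++ PySem.List.pyGetD lista 0 "" ++ "]"
     else if lista ≠ [] ∧ numero_palavras lista > 1 then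
       "[" ++ ((PySem.List.pyRange 0 (numero_palavras lista - 1)).foldl
          (fun lista_str j =>
            lista_str ++ palavra_potencial_para_cadeia (PySem.List.pyGetD lista j "") ++ ", ") "")
          ++ PySem.List.pyGetD lista (-1) "" ++ "]"
     else "") = pvEntry cp i := by
  rw [subconjunto_eq_bucket]
  simp only []
  set L := PySem.List.sorted (pvBucket cp i) (fun w => w) with hL
  have hnil : L = [] ↔ pvBucket cp i = [] := PySem.List.sorted_eq_nil_iff _ _ _
  unfold pvEntry
  by_cases hb : pvBucket cp i = []
  · have : L = [] := hnil.mpr hb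
    simp [this, hb, numero_palavras, PySem.List.len]
  · have hLne : L ≠ [] := fun h => hb (hnil.mp h)
    rw [if_neg hb]
    by_cases h1 : numero_palavras L = 1
    · rw [if_pos ⟨hLne, h1⟩]
      have : L.length = 1 := by
        simp only [numero_palavras, PySem.List.len] at h1; exact_mod_cast h1
      obtain ⟨w, hw⟩ := List.length_eq_one_iff.mp this
      rw [← String.toList_inj]
      rw [show PySem.List.sorted (pvBucket cp i) (fun w => w) = L from hL.symm, hw]
      simp [PySem.Str.toList_join, PySem.Chars.join, List.intercalate,
        String.toList_append, PySem.List.pyGetD, PySem.List.pyGet?, PySem.List.pyIdx?]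
    · have hgt : numero_palavras L > 1 := by
        have : 0 < L.length := List.length_pos_of_ne_nil hLne
        simp only [numero_palavras, PySem.List.len] at h1 ⊢; omega
      rw [if_neg (by tauto), if_pos ⟨hLne, hgt⟩]
      have hjoin := loop_join L hLne
      rw [← String.toList_inj]
      rw [← hjoin]
      simp only [numero_palavras, palavra_potencial_para_cadeia, String.toList_append]
      simp [List.append_assoc]

-- what A's dict holds at each key 0 ≤ i ≤ m
lemma getD_pvResLoop (cp : List String) (m i : Int) (h0 : 0 ≤ i) (h1 : i ≤ m) :
    (pvResLoop cp m).getD i "" = pvEntry cp i := by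
  unfold pvResLoop
  have hbody : (fun (res : PySem.Dict Int String) i =>
      let lista := PySem.List.sorted (subconjunto_por_tamanho cp i) (fun w => w)
      if lista ≠ [] ∧ numero_palavras lista = 1 then
        res.insert i ("[" ++ PySem.List.pyGetD lista 0 "" ++ "]")
      else if lista ≠ [] ∧ numero_palavras lista > 1 then
        let lista_str := (PySem.List.pyRange 0 (numero_palavras lista - 1)).foldl
          (fun lista_str j =>
            lista_str ++ palavra_potencial_para_cadeia (PySem.List.pyGetD lista j "") ++ ", ") ""
        res.insert i ("[" ++ lista_str ++ PySem.List.pyGetD lista (-1) "" ++ "]")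
      else res.insert i "")
      = (fun (res : PySem.Dict Int String) i => res.insert i (pvEntry cp i)) := by
    funext res i
    rw [← pvResLoop_body_val cp i]
    simp only []
    split_ifs <;> rfl
  rw [hbody, getD_foldl_insert_fn]
  rw [if_pos (PySem.List.mem_pyRange_one.mpr ⟨h0, by omega⟩)]

def pvPiece (res : PySem.Dict Int String) (n : Int) : List Char :=
  (if res.getD n "" = "" then "" else
    PySem.Int.toStr n ++ "->" ++ res.getD n "" ++ ";").toList

lemma pvCadeiaLoop_toList (res : PySem.Dict Int String) (fuel : Nat) (j : Int) (cad : String) :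
    (pvCadeiaLoop res fuel j cad).toList
    = cad.toList ++ ((List.range fuel).map (fun (t : Nat) => pvPiece res (j + (t : Int)))).flatten := by
  induction fuel generalizing j cad with
  | zero => simp [pvCadeiaLoop]
  | succ fuel ih =>
    have hstep : pvCadeiaLoop res (fuel+1) j cad
        = pvCadeiaLoop res fuel (j+1)
            (if res.getD j "" == "" then cad
             else cad ++ PySem.Int.toStr j ++ "->" ++ res.getD j "" ++ ";") := by
      show (if res.getD j "" == "" then pvCadeiaLoop res fuel (j+1) cad else _) = _
      by_cases h : res.getD j "" == "" <;> simp [h]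
    rw [hstep, ih, List.range_succ_eq_map, List.map_cons, List.map_map]
    have hcomp : ((fun t : Nat => pvPiece res (j + (t : Int))) ∘ Nat.succ)
        = (fun t : Nat => pvPiece res (j + 1 + (t : Int))) := by
      funext t
      simp only [Function.comp]
      congr 1
      push_cast
      ring
    rw [List.flatten_cons, hcomp]
    have hz : j + ((0:Nat) : Int) = j := by norm_num
    rw [hz]
    by_cases h : res.getD j "" = ""
    · rw [if_pos (by simp [h] : (res.getD j "" == "") = true)]
      simp [pvPiece, h]
    · rw [if_neg (by simp [h] : ¬ (res.getD j "" == "") = true)]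
      simp [pvPiece, h, String.toList_append, List.append_assoc]

-- B's buckets dict holds exactly the filtered sublists
lemma getD_buckets (cp : List String) (n : Int) :
    (cp.foldl (fun (b : PySem.Dict Int (List String)) w =>
        b.modify (PySem.Str.len w) [] (fun l => l ++ [w])) PySem.Dict.empty).getD n []
    = pvBucket cp n := by
  have h : (cp.foldl (fun (b : PySem.Dict Int (List String)) w =>
        b.modify (PySem.Str.len w) [] (fun l => l ++ [w])) PySem.Dict.empty)
      = ((cp.map (fun w => (PySem.Str.len w, w))).foldl
          (fun (b : PySem.Dict Int (List String)) p => b.modify p.1 [] (fun l => l ++ [p.2]))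
          PySem.Dict.empty) := by
    rw [List.foldl_map]
  rw [h, PySem.Dict.getD_foldl_modify_append]
  simp [pvBucket, List.filter_map, Function.comp_def, PySem.Dict.getD_empty]

lemma keys_buckets (cp : List String) :
    (cp.foldl (fun (b : PySem.Dict Int (List String)) w =>
        b.modify (PySem.Str.len w) [] (fun l => l ++ [w])) PySem.Dict.empty).keys
    = PySem.Set.update (PySem.Dict.empty : PySem.Dict Int (List String)).keys (cp.map PySem.Str.len) := by
  exact PySem.Dict.keys_foldl_modify_key cp PySem.Str.len [] (fun _ w => (fun l => l ++ [w])) _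

lemma pv_flatten_filter (q : Int → Bool) (g : Int → List Char) (xs : List Int) :
    (xs.map (fun j => if q j then g j ++ [';'] else [])).flatten
    = (((xs.filter q).map g).map (fun x => x ++ [';'])).flatten := by
  induction xs with
  | nil => simp
  | cons x xs ih =>
    by_cases h : q x <;> simp [h, ih]

-- ASCII literal facts used to normalise both printed forms
lemma pv_lit_arrow : ("->" : String).toList = ['-', '>'] := rfl
lemma pv_lit_arrowBr : ("->[" : String).toList = ['-', '>', '['] := rfl
lemma pv_lit_lbr : ("[" : String).toList = ['['] := rfl
lemma pv_lit_rbr : ("]" : String).toList = [']'] := rfl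
lemma pv_lit_semi : (";" : String).toList = [';'] := rfl

lemma pvBucket_ne_nil_iff (cp : List String) (n : Int) :
    pvBucket cp n ≠ [] ↔ n ∈ cp.map PySem.Str.len := by
  unfold pvBucket
  rw [Ne, List.filter_eq_nil_iff]
  simp only [List.mem_map, beq_iff_eq]
  constructor
  · intro h
    simp only [not_forall, not_not, exists_prop] at h
    obtain ⟨w, hw, he⟩ := h
    exact ⟨w, hw, he⟩
  · rintro ⟨w, hw, rfl⟩ h
    exact h w hw rfl

lemma pvPiece_eq (cp : List String) (M n : Int) (h0 : 0 ≤ n) (h1 : n ≤ M) :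
    pvPiece (pvResLoop cp M) n
    = if decide (pvBucket cp n ≠ []) = true then pvPartC cp n ++ [';'] else [] := by
  unfold pvPiece
  rw [getD_pvResLoop cp M n h0 h1]
  by_cases hb : pvBucket cp n = []
  · simp [pvEntry, hb]
  · have hne : pvEntry cp n ≠ "" := by
      unfold pvEntry
      rw [if_neg hb]
      intro hc
      have h2 := congrArg String.toList hc
      simp [String.toList_append, pv_lit_lbr] at h2
    rw [if_neg hne, if_pos (by simpa using hb)]
    unfold pvEntry
    rw [if_neg hb]
    simp [pvPartC, String.toList_append, List.append_assoc,
      pv_lit_arrow, pv_lit_arrowBr, pv_lit_lbr, pv_lit_rbr]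

lemma partB_toList (cp : List String) (n : Int) :
    (PySem.Int.toStr n ++ "->[" ++
      PySem.Str.join ", " (PySem.List.sorted (pvBucket cp n) (fun w => w)) ++ "]").toList
    = pvPartC cp n := by
  simp [pvPartC, String.toList_append, List.append_assoc]

lemma pv_le_getLast (l : List String) (h : l ≠ [])
    (hp : List.Pairwise (fun a b => PySem.Str.len a ≤ PySem.Str.len b) l) :
    ∀ x ∈ l, PySem.Str.len x ≤ PySem.Str.len (l.getLast h) := by
  intro x hx
  have hx2 : x ∈ l.dropLast ++ [l.getLast h] := by
    rw [List.dropLast_append_getLast h]; exact hx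
  have hp2 : List.Pairwise (fun a b => PySem.Str.len a ≤ PySem.Str.len b)
      (l.dropLast ++ [l.getLast h]) := by
    rw [List.dropLast_append_getLast h]; exact hp
  rcases List.mem_append.mp hx2 with hd | hl
  · exact (List.pairwise_append.mp hp2).2.2 x hd _ (List.mem_singleton.mpr rfl)
  · rw [List.mem_singleton.mp hl]

lemma pv_sorted_keys (cp : List String) (M : Int) (hM : 0 ≤ M)
    (hmax : ∀ w ∈ cp, PySem.Str.len w ≤ M) :
    PySem.List.sorted
      ((cp.foldl (fun (b : PySem.Dict Int (List String)) w =>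
          b.modify (PySem.Str.len w) [] (fun l => l ++ [w])) PySem.Dict.empty).keys)
      (fun n => n)
    = (PySem.List.pyRange 0 (M + 1)).filter (fun n => decide (pvBucket cp n ≠ [])) := by
  have hr1 : PySem.List.pyRange 0 (M + 1)
      = (List.range (M + 1).toNat).map (fun k : Nat => (k : Int)) := by
    conv_lhs => rw [show M + 1 = (((M + 1).toNat : Nat) : Int) by omega]
    exact PySem.List.pyRange_zero_natCast (M + 1).toNat
  have hnodupR : (PySem.List.pyRange 0 (M + 1)).Nodup := by
    rw [hr1]
    exact List.nodup_range.map Nat.cast_injective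
  have hpairR : List.Pairwise (fun a b : Int => a < b) (PySem.List.pyRange 0 (M + 1)) := by
    rw [hr1, List.pairwise_map]
    exact List.pairwise_lt_range.imp (by intro a b hab; exact_mod_cast hab)
  apply PySem.List.sorted_eq_of_perm_of_pairwise_lt
  · rw [List.perm_ext_iff_of_nodup (List.Nodup.filter _ hnodupR)
      (by
        rw [keys_buckets, PySem.Dict.keys_empty]
        exact PySem.Set.nodup_update _ _ List.nodup_nil)]
    intro n
    rw [List.mem_filter, PySem.List.mem_pyRange_one, keys_buckets, PySem.Dict.keys_empty]
    rw [PySem.Set.mem_update]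
    simp only [List.not_mem_nil, false_or, decide_eq_true_eq]
    constructor
    · rintro ⟨-, hb⟩
      exact (pvBucket_ne_nil_iff cp n).mp hb
    · intro hmem
      refine ⟨?_, (pvBucket_ne_nil_iff cp n).mpr hmem⟩
      obtain ⟨w, hw, rfl⟩ := List.mem_map.mp hmem
      have := hmax w hw
      have hlen : 0 ≤ PySem.Str.len w := by
        rw [PySem.Str.len_eq]; exact Int.natCast_nonneg _
      omega
  · exact List.Pairwise.filter _ hpairR

lemma pvCoreCp (cp : List String) (M : Int) (hM : 0 ≤ M) (hbM : pvBucket cp M ≠ [])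
    (rest : List Char) :
    ((List.range M.toNat).map (fun (t : Nat) =>
        if decide (pvBucket cp (t : Int) ≠ []) = true then pvPartC cp (t : Int) ++ [';'] else [])).flatten
      ++ (pvPartC cp M ++ rest)
    = [';'].intercalate
        (((PySem.List.pyRange 0 (M + 1)).filter (fun n => decide (pvBucket cp n ≠ []))).map
          (pvPartC cp)) ++ rest := by
  have hrange : PySem.List.pyRange 0 M = (List.range M.toNat).map (fun k : Nat => (k : Int)) := by
    conv_lhs => rw [show M = ((M.toNat : Nat) : Int) by omega]
    exact PySem.List.pyRange_zero_natCast M.toNat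
  have hsucc : PySem.List.pyRange 0 (M + 1) = PySem.List.pyRange 0 M ++ [M] :=
    PySem.List.pyRange_one_succ_right hM
  rw [hsucc, List.filter_append]
  have hfM : List.filter (fun n => decide (pvBucket cp n ≠ [])) [M] = [M] := by
    simp [hbM]
  rw [hfM, List.map_append, List.map_cons, List.map_nil, pv_intercalate_snoc]
  have hflat : ((List.range M.toNat).map (fun (t : Nat) =>
      if decide (pvBucket cp (t : Int) ≠ []) = true then pvPartC cp (t : Int) ++ [';'] else [])).flatten
      = ((((PySem.List.pyRange 0 M).filter (fun n => decide (pvBucket cp n ≠ []))).map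
          (pvPartC cp)).map (fun x => x ++ [';'])).flatten := by
    rw [← pv_flatten_filter (fun n => decide (pvBucket cp n ≠ [])) (pvPartC cp)
        (PySem.List.pyRange 0 M), hrange, List.map_map]
    rfl
  rw [hflat]
  simp [List.append_assoc]

theorem conjunto_palavras_para_cadeia_spec_aux (cp : List String) :
    conjunto_palavras_para_cadeia cp = conjunto_palavras_para_cadeia_alt cp := by
  by_cases hcp : cp = []
  · subst hcp; rfl
  · unfold conjunto_palavras_para_cadeia conjunto_palavras_para_cadeia_alt
    simp only []
    set conjunto := PySem.List.sorted cp (fun w => palavra_tamanho w) with hconj_def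
    have hconj : conjunto ≠ [] := by
      rw [hconj_def, Ne, PySem.List.sorted_eq_nil_iff]; exact hcp
    rw [if_pos hconj, if_neg hcp]
    have hg : PySem.List.pyGetD conjunto (-1) "" = conjunto.getLast hconj :=
      pyGetD_neg_one _ _ hconj
    set M := palavra_tamanho (PySem.List.pyGetD conjunto (-1) "") with hM_def
    have hMg : M = PySem.Str.len (conjunto.getLast hconj) := by
      rw [hM_def, hg]; rfl
    have hM0 : 0 ≤ M := by
      rw [hMg, PySem.Str.len_eq]; exact Int.natCast_nonneg _
    have hperm : conjunto.Perm cp := PySem.List.sorted_perm cp _ _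
    have hpair : List.Pairwise (fun a b => PySem.Str.len a ≤ PySem.Str.len b) conjunto :=
      PySem.List.sorted_pairwise cp (fun w => PySem.Str.len w)
    have hmax : ∀ w ∈ cp, PySem.Str.len w ≤ M := by
      intro w hw
      rw [hMg]
      exact pv_le_getLast conjunto hconj hpair w (hperm.mem_iff.mpr hw)
    have hbM : pvBucket cp M ≠ [] := by
      rw [pvBucket_ne_nil_iff]
      exact List.mem_map.mpr ⟨conjunto.getLast hconj,
        hperm.mem_iff.mp (List.getLast_mem hconj), hMg.symm⟩
    rw [← String.toList_inj]
    -- left side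
    simp only [String.toList_append]
    rw [pvCadeiaLoop_toList]
    simp only [String.toList_empty, List.nil_append, zero_add]
    rw [List.map_congr_left (fun (t : Nat) ht =>
      pvPiece_eq cp M (t : Int) (Int.natCast_nonneg t)
        (by have := List.mem_range.mp ht; omega))]
    rw [getD_pvResLoop cp M M hM0 le_rfl]
    unfold pvEntry
    rw [if_neg hbM]
    -- right side
    rw [PySem.List.foldl_append_singleton_eq_map, List.nil_append]
    simp only [getD_buckets]
    rw [pv_sorted_keys cp M hM0 hmax]
    rw [PySem.Str.toList_join, PySem.Chars.join, pv_lit_semi, List.map_map]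
    have hmapB := List.map_congr_left
      (f := String.toList ∘ fun n => PySem.Int.toStr n ++ "->[" ++
        PySem.Str.join ", " (PySem.List.sorted (pvBucket cp n) (fun w => w)) ++ "]")
      (g := pvPartC cp)
      (l := (PySem.List.pyRange 0 (M + 1)).filter (fun n => decide (pvBucket cp n ≠ [])))
      (fun n _ => partB_toList cp n)
    rw [hmapB]
    have hcore := pvCoreCp cp M hM0 hbM []
    simp only [List.append_nil] at hcore
    rw [← hcore]
    simp [pvPartC, String.toList_append, List.append_assoc,
      pv_lit_arrow, pv_lit_arrowBr, pv_lit_lbr, pv_lit_rbr]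

-- ===== VERDICT (by name: the statement is the Claim_ definition above) =====
theorem conjunto_palavras_para_cadeia_spec : Claim_equal_conjunto_palavras_para_cadeia := by
  intro cp _
  exact conjunto_palavras_para_cadeia_spec_aux cp
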